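-- pv_equiv track=rewrite | github.com/bmpasini/CtCI-6th-Edition | chap-8/8.5.py | _recursive_multiply2
-- ===== SOURCE A (Python) =====
-- def _recursive_multiply2(a, b):
--     if b == 0:
--         return 0
--     if b == 1:
--         return a
--     half = _recursive_multiply2(a, b >> 1)
--     if b % 2 == 0:
--         return half << 1
--     else:
--         return a + (half << 1)
-- ===== SOURCE B (Python) =====
-- def _recursive_multiply2(a, b):
--     result = 0
--     while b:
--         if b & 1:
--             result += a
--         a <<= 1
--         b >>= 1
--     return result
-- ===== Notes on version B (the rewrite author's own statement) =====
-- stated objective: alternative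
-- what changed: Replaces the recursion on b>>1 (combining results on return) with an iterative Russian-peasant shift-add loop that accumulates shifted copies of a in an explicit result variable.
import Mathlib
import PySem

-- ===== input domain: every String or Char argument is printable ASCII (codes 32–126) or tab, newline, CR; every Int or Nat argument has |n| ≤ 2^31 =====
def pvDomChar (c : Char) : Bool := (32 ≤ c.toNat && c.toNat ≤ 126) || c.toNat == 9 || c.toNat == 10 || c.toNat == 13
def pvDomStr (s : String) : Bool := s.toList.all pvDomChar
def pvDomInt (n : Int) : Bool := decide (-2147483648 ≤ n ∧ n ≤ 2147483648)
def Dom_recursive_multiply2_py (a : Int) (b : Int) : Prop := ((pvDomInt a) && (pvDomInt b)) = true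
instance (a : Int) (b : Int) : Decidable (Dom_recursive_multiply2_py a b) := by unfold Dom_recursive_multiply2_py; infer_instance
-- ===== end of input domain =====

-- B replaces A's recursion on b>>1 with an iterative shift-add (Russian peasant) loop
-- using an explicit accumulator; equal results on all a and all b ≥ 0 (Pre_).

-- ===== PORT A =====
-- A recurses on b >> 1; for b ≥ 0 this is b / 2 on Nat, so the port recurses on b.toNat.
def recMulA (a : Int) : Nat → Int
  | 0 => 0
  | 1 => a
  | n+2 =>
    let half := recMulA a ((n+2)/2)
    if (n+2) % 2 == 0 then half * 2 else a + half * 2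
  decreasing_by omega

def recursive_multiply2_py (a : Int) (b : Int) : Int := recMulA a b.toNat

-- ===== PORT B =====
-- Source B's while-loop: state (a, result), b halves each step (on Nat since b ≥ 0).
def peasantLoop (a result : Int) : Nat → Int
  | 0 => result
  | n+1 =>
    peasantLoop (a * 2) (if (n+1) % 2 == 1 then result + a else result) ((n+1)/2)
  decreasing_by omega

def recursive_multiply2_py_alt (a : Int) (b : Int) : Int := peasantLoop a 0 b.toNat

-- ===== PRECONDITION & SPEC =====
-- Pre_ excludes b < 0, where Python A raises RecursionError (b >> 1 never reaches the
-- base cases) and B's while-loop never terminates either.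
def Pre_recursive_multiply2_py (a : Int) (b : Int) : Prop := 0 ≤ b
instance (a : Int) (b : Int) : Decidable (Pre_recursive_multiply2_py a b) := by
  unfold Pre_recursive_multiply2_py; infer_instance

def pvWitness_recursive_multiply2_py : Int × Int := (3, 5)

def Spec_recursive_multiply2_py (a : Int) (b : Int) (out : Int) : Prop := out = recursive_multiply2_py_alt a b
instance (a : Int) (b : Int) (out : Int) : Decidable (Spec_recursive_multiply2_py a b out) := by
  unfold Spec_recursive_multiply2_py; infer_instance

-- ===== CLAIM (what is proved, stated in full; the proofs are below) =====
def Claim_equal_recursive_multiply2_py : Prop := ∀ (a : Int) (b : Int), Dom_recursive_multiply2_py a b → Pre_recursive_multiply2_py a b → Spec_recursive_multiply2_py a b (recursive_multiply2_py a b)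

-- ===== LEMMAS AND PROOFS =====

theorem recMulA_eq (a : Int) (n : Nat) : recMulA a n = a * n := by
  induction n using Nat.strong_induction_on with
  | _ n ih =>
    match n with
    | 0 => simp [recMulA]
    | 1 => simp [recMulA]
    | n+2 =>
      rw [recMulA, ih ((n+2)/2) (by omega)]
      have hm : ((n+2 : Nat) : Int) = 2 * (((n+2)/2 : Nat) : Int) + (((n+2) % 2 : Nat) : Int) := by
        exact_mod_cast (Nat.div_add_mod (n+2) 2).symm
      by_cases h : (n+2) % 2 = 0
      · rw [if_pos (by simp [h])]
        rw [h] at hm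
        linear_combination (-a) * hm
      · have h1 : (n+2) % 2 = 1 := by omega
        rw [if_neg (by simp [h1])]
        rw [h1] at hm
        linear_combination (-a) * hm

theorem peasantLoop_eq (n : Nat) : ∀ (a result : Int), peasantLoop a result n = result + a * n := by
  induction n using Nat.strong_induction_on with
  | _ n ih =>
    match n with
    | 0 => intro a r; simp [peasantLoop]
    | n+1 =>
      intro a r
      rw [peasantLoop, ih ((n+1)/2) (by omega)]
      have hm : ((n+1 : Nat) : Int) = 2 * (((n+1)/2 : Nat) : Int) + (((n+1) % 2 : Nat) : Int) := by
        exact_mod_cast (Nat.div_add_mod (n+1) 2).symm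
      by_cases h : (n+1) % 2 = 1
      · rw [if_pos (by simp [h])]
        rw [h] at hm
        linear_combination (-a) * hm
      · have h0 : (n+1) % 2 = 0 := by omega
        rw [if_neg (by simp [h0])]
        rw [h0] at hm
        linear_combination (-a) * hm

-- ===== VERDICT (by name: the statement is the Claim_ definition above) =====
theorem recursive_multiply2_py_spec : Claim_equal_recursive_multiply2_py := by
  intro a b _ _
  unfold Spec_recursive_multiply2_py recursive_multiply2_py recursive_multiply2_py_alt
  rw [recMulA_eq, peasantLoop_eq, zero_add]
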